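-- pv_equiv track=rewrite | github.com/Chendada-8474/solar-panel-report | utils/tools.py | split_pond_indexes
-- ===== SOURCE A (Python) =====
-- def split_pond_indexes(ponds_indexes: str) -> list:
--     indexes, tmp = [], []
--     ponds_indexes += "_"
--     for i in ponds_indexes:
--         if i.isdigit():
--             tmp.append(i)
--         elif tmp:
--             indexes.append(int("".join(tmp)))
--             tmp = []
--     return indexes
-- ===== SOURCE B (Python) =====
-- def split_pond_indexes(ponds_indexes: str) -> list:
--     masked = "".join(c if c.isdigit() else " " for c in ponds_indexes)
--     return [int(tok) for tok in masked.split()]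
-- ===== Notes on version B (the rewrite author's own statement) =====
-- stated objective: alternative
-- what changed: Replaced the manual accumulator-and-sentinel loop with two staged passes: first mask every non-digit character to a space, then let str.split() cut out the digit tokens and convert each with int.
import Mathlib
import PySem

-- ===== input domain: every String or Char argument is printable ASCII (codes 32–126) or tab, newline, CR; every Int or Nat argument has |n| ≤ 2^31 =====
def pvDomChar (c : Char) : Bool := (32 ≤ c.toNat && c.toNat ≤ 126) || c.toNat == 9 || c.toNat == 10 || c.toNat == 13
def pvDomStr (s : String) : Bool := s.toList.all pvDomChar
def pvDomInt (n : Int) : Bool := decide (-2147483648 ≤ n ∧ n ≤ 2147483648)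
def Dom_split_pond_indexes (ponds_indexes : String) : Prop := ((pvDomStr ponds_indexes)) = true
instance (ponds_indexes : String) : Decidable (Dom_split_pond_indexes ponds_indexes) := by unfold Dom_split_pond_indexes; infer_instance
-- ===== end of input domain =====

-- B replaces A's sentinel-and-buffer loop by two staged passes: mask non-digits to spaces, then split() and int each token (alternative; same cost).


-- ===== PORT A =====
-- int("".join(tmp)) : tmp is always a nonempty run of ASCII digits here, so int() always succeeds;
-- .getD 0 is never taken (exact on the admitted domain).
def pvJoinInt (tmp : List Char) : Int := (PySem.Int.ofChars? tmp).getD 0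

-- step of the for-loop: state = (indexes, tmp)
def pvStepA (st : List Int × List Char) (i : Char) : List Int × List Char :=
  if PySem.Chars.isdigit i then (st.1, st.2 ++ [i])
  else if st.2 ≠ [] then (st.1 ++ [pvJoinInt st.2], [])
  else st

def split_pond_indexes (ponds_indexes : String) : List Int :=
  ((ponds_indexes.toList ++ ['_']).foldl pvStepA ([], [])).1

-- ===== PORT B =====
-- masked = "".join(c if c.isdigit() else " " for c in ponds_indexes)
def pvMask (c : Char) : Char := if PySem.Chars.isdigit c then c else ' '

-- [int(tok) for tok in masked.split()]
def split_pond_indexes_alt (ponds_indexes : String) : List Int :=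
  (PySem.Chars.split₀ (ponds_indexes.toList.map pvMask)).map pvJoinInt

-- ===== PRECONDITION & SPEC =====
def Spec_split_pond_indexes (ponds_indexes : String) (out : List Int) : Prop := out = split_pond_indexes_alt ponds_indexes
instance (ponds_indexes : String) (out : List Int) : Decidable (Spec_split_pond_indexes ponds_indexes out) := by unfold Spec_split_pond_indexes; infer_instance

-- ===== CLAIM =====
def Claim_equal_split_pond_indexes : Prop := ∀ (ponds_indexes : String), Dom_split_pond_indexes ponds_indexes → Spec_split_pond_indexes ponds_indexes (split_pond_indexes ponds_indexes)

-- ===== LEMMAS AND PROOFS =====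

-- functional description of A's loop with buffer tmp
def pvGo (tmp : List Char) : List Char → List Int
  | [] => if tmp = [] then [] else [pvJoinInt tmp]
  | c :: cs =>
    if PySem.Chars.isdigit c then pvGo (tmp ++ [c]) cs
    else if tmp = [] then pvGo [] cs
    else pvJoinInt tmp :: pvGo [] cs

theorem pvFoldA_eq (cs : List Char) : ∀ (acc : List Int) (tmp : List Char),
    ((cs ++ ['_']).foldl pvStepA (acc, tmp)).1 = acc ++ pvGo tmp cs := by
  induction cs with
  | nil =>
    intro acc tmp
    simp only [List.nil_append, List.foldl_cons, List.foldl_nil, pvStepA, pvGo]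
    by_cases h : tmp = [] <;> simp [h, PySem.Chars.isdigit]
  | cons c cs ih =>
    intro acc tmp
    simp only [List.cons_append, List.foldl_cons]
    by_cases hd : PySem.Chars.isdigit c
    · rw [show pvStepA (acc, tmp) c = (acc, tmp ++ [c]) by simp [pvStepA, hd], ih]
      simp [pvGo, hd]
    · by_cases ht : tmp = []
      · rw [show pvStepA (acc, tmp) c = (acc, tmp) by simp [pvStepA, hd, ht], ht, ih]
        simp [pvGo, hd]
      · rw [show pvStepA (acc, tmp) c = (acc ++ [pvJoinInt tmp], []) by
              simp [pvStepA, hd, ht], ih]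
        simp [pvGo, hd, ht]

theorem pv_digit_not_space (c : Char) (h : PySem.Chars.isdigit c = true) :
    PySem.Chars.isspace c = false := by
  have h' : 48 ≤ c.toNat ∧ c.toNat ≤ 57 := by
    simp only [PySem.Chars.isdigit, Bool.and_eq_true, decide_eq_true_eq, Char.le_def] at h
    exact ⟨UInt32.le_iff_toNat_le.mp h.1, UInt32.le_iff_toNat_le.mp h.2⟩
  simp only [PySem.Chars.isspace, Bool.or_eq_false_iff, Bool.and_eq_false_iff,
    decide_eq_false_iff_not, not_le]
  omega

-- split₀.go over the masked list realises A's buffer loop: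
-- cur.reverse is the pending digit run, acc.reverse the collected runs.
theorem pv_split_go_eq (cs : List Char) : ∀ (cur : List Char) (acc : List (List Char)),
    (PySem.Chars.split₀.go (cs.map pvMask) cur acc).map pvJoinInt
      = acc.reverse.map pvJoinInt ++ pvGo cur.reverse cs := by
  induction cs with
  | nil =>
    intro cur acc
    simp only [List.map_nil, PySem.Chars.split₀.go, pvGo]
    by_cases h : cur = [] <;> simp [h]
  | cons c cs ih =>
    intro cur acc
    simp only [List.map_cons, PySem.Chars.split₀.go]
    by_cases hd : PySem.Chars.isdigit c
    · rw [show pvMask c = c from if_pos hd]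
      rw [if_neg (by simp [pv_digit_not_space c hd])]
      rw [ih (c :: cur) acc]
      simp [pvGo, hd]
    · rw [show pvMask c = ' ' from if_neg hd]
      rw [if_pos (by decide)]
      by_cases hc : cur = []
      · rw [if_pos (by simp [hc])]
        rw [ih [] acc]
        simp [pvGo, hd, hc]
      · rw [if_neg (by simp [hc])]
        rw [ih [] (cur.reverse :: acc)]
        simp [pvGo, hd, hc]

-- ===== VERDICT =====
theorem split_pond_indexes_spec : Claim_equal_split_pond_indexes := by
  intro s _
  unfold Spec_split_pond_indexes split_pond_indexes split_pond_indexes_alt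
  rw [pvFoldA_eq s.toList [] []]
  unfold PySem.Chars.split₀
  simpa using (pv_split_go_eq s.toList [] []).symm
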